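-- pv_equiv track=rewrite | github.com/Felipe-Caldeira/CS-337-Project-1 | globals.py | adjustLemmas
-- ===== SOURCE A (Python) =====
-- def adjustLemmas(words):
--     new_words = words
--     switch = False
--     for i, word in enumerate(words):
--         for original, new in {
--             "best":"good",
--             "well":"good",
--             "support":"supporting",
--             "performance":"",
--             "role":"",
--             "language":"",
--             "television":"tv"
--             }.items():
--             if word == original: new_words[i] = new
--             if i < len(new_words) - 1 and word in ["actor", "actress"] and new_words[i + 1] == "supporting":
--                 switch = (i, i + 1)
--
--     if switch:
--         new_words[switch[0]], new_words[switch[1]] = new_words[switch[1]], new_words[switch[0]]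
--     return new_words
-- ===== SOURCE B (Python) =====
-- def adjustLemmas(words):
--     # Single backward pass: build the output back-to-front, consuming an
--     # "actor/actress"+"supporting" pair eagerly the first time it is seen
--     # (= the last such pair in forward order), replacing lemmas otherwise.
--     # Like A, mutates the argument list in place (via slice assignment).
--     lemma = {
--         "best": "good",
--         "well": "good",
--         "support": "supporting",
--         "performance": "",
--         "role": "",
--         "language": "",
--         "television": "tv",
--     }
--     out = []
--     swapped = False
--     i = len(words) - 1
--     while i >= 0:
--         w = words[i]
--         if not swapped and i > 0 and w == "supporting" and words[i - 1] in ("actor", "actress"):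
--             out.append(words[i - 1])
--             out.append("supporting")
--             swapped = True
--             i -= 2
--         else:
--             out.append(lemma.get(w, w))
--             i -= 1
--     out.reverse()
--     words[:] = out
--     return words
-- ===== Notes on version B (the rewrite author's own statement) =====
-- stated objective: alternative
-- what changed: A interleaves lemma replacement and actor/actress+'supporting' pair detection in one forward nested loop (rebuilding the 7-entry dict per word) and swaps afterwards; B is a single backward pass that builds the output back-to-front, consuming the last such pair the moment it is seen and replacing lemmas otherwise, with no separate detection or swap step.
import Mathlib
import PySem

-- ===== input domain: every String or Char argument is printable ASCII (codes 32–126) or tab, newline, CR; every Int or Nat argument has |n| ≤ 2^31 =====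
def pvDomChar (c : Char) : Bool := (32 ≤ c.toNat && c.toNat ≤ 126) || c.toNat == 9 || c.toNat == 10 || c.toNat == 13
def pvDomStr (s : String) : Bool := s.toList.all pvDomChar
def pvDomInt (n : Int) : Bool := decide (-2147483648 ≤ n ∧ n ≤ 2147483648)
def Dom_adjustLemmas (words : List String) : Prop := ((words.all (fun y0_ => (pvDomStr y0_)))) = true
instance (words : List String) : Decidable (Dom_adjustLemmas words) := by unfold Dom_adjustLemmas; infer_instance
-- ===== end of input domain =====

-- B replaces A's nested forward loop (dict literal rebuilt per word, detection interleaved with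
-- replacement, then a final swap) by ONE backward pass that builds the output back-to-front and
-- consumes the last actor/actress+"supporting" pair the moment it is seen; both mutate the
-- argument list in place identically, and the equivalence proved is about the return value.

-- ===== PORT A =====
-- the dict literal A rebuilds on every inner iteration, in insertion order
def lemmaItemsA : List (String × String) :=
  [("best", "good"), ("well", "good"), ("support", "supporting"), ("performance", ""),
   ("role", ""), ("language", ""), ("television", "tv")]

-- one inner-loop iteration of A: state = (new_words, switch)
def innerA (i : Nat) (word : String) (st : List String × Option (Nat × Nat))
    (p : String × String) : List String × Option (Nat × Nat) :=
  let nw := if word == p.1 then st.1.set i p.2 else st.1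
  let sw := if i < nw.length - 1 ∧ (word = "actor" ∨ word = "actress") ∧
               nw.getD (i + 1) "" = "supporting"
            then some (i, i + 1) else st.2
  (nw, sw)

-- one outer-loop iteration: word is read from the live (aliased) list
def stepA (st : List String × Option (Nat × Nat)) (i : Nat) :
    List String × Option (Nat × Nat) :=
  let word := st.1.getD i ""
  lemmaItemsA.foldl (innerA i word) st

def adjustLemmas (words : List String) : List String :=
  let st := (List.range words.length).foldl stepA (words, none)
  match st.2 with
  | some (a, b) => (st.1.set a (st.1.getD b "")).set b (st.1.getD a "")
  | none => st.1

-- ===== PORT B =====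
def lemmaDictB : PySem.Dict String String :=
  PySem.Dict.ofList
    [("best", "good"), ("well", "good"), ("support", "supporting"), ("performance", ""),
     ("role", ""), ("language", ""), ("television", "tv")]

-- lemma.get(w, w)
def replB (w : String) : String := PySem.Dict.getD lemmaDictB w w

-- B's while-loop: index i is represented as m = i+1 (loop runs while i >= 0); the Python
-- appends to `out` and reverses at the end, rendered here as cons-accumulation (same list).
def goB (words : List String) (m : Nat) (swapped : Bool) (out : List String) : List String :=
  match m with
  | 0 => out
  | i + 1 =>
      let w := words.getD i ""
      if !swapped && decide (0 < i) && (w == "supporting") &&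
          (words.getD (i - 1) "" == "actor" || words.getD (i - 1) "" == "actress")
      then goB words (i - 1) true ("supporting" :: words.getD (i - 1) "" :: out)
      else goB words i swapped (replB w :: out)
  termination_by m
  decreasing_by all_goals omega

def adjustLemmas_alt (words : List String) : List String :=
  goB words words.length false []

-- ===== PRECONDITION & SPEC =====
def Spec_adjustLemmas (words : List String) (out : List String) : Prop := out = adjustLemmas_alt words
instance (words : List String) (out : List String) : Decidable (Spec_adjustLemmas words out) := by unfold Spec_adjustLemmas; infer_instance

-- ===== CLAIM (what is proved, stated in full; the proofs are below) =====
def Claim_equal_adjustLemmas : Prop := ∀ (words : List String), Dom_adjustLemmas words → Spec_adjustLemmas words (adjustLemmas words)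

-- ===== LEMMAS AND PROOFS =====

-- the replacement function, proof-side alias
def replF : String → String := replB

-- the list state of A's loop after processing the first k positions
def Lst (words : List String) (k : Nat) : List String :=
  (words.take k).map replF ++ words.drop k

-- just the replacement effect of one inner iteration of A
def setStep (i : Nat) (word : String) (nw : List String) (p : String × String) : List String :=
  if word == p.1 then nw.set i p.2 else nw

-- the (invariant) switch condition of A at position i, as seen on list nw
abbrev CbP (i : Nat) (word : String) (nw : List String) : Prop :=
  i < nw.length - 1 ∧ (word = "actor" ∨ word = "actress") ∧ nw.getD (i + 1) "" = "supporting"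

-- the switch condition of A, evaluated on the ORIGINAL words
def condA (words : List String) (j : Nat) : Bool :=
  decide (j < words.length - 1) &&
    (words.getD j "" == "actor" || words.getD j "" == "actress") &&
    (words.getD (j + 1) "" == "supporting")

-- the swap both programs perform, as one operation
def swapAt (l : List String) (j : Nat) : List String :=
  (l.set j (l.getD (j + 1) "")).set (j + 1) (l.getD j "")

-- the common normal form both ports are reduced to
def specForm (words : List String) : List String :=
  match (List.range (words.length - 1)).reverse.find? (condA words) with
  | some j => swapAt (words.map replF) j
  | none => words.map replF

theorem length_Lst (words : List String) (k : Nat) : (Lst words k).length = words.length := by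
  simp [Lst]; omega

theorem length_map_take (words : List String) {k : Nat} (hk : k ≤ words.length) :
    ((words.take k).map replF).length = k := by
  simp [List.length_take]; omega

theorem getD_Lst_ge (words : List String) {k j : Nat} (hk : k ≤ words.length) (h : k ≤ j) :
    (Lst words k).getD j "" = words.getD j "" := by
  unfold Lst List.getD
  rw [List.getElem?_append_right (by rw [length_map_take words hk]; omega),
    length_map_take words hk, List.getElem?_drop, Nat.add_sub_cancel' h]

theorem Lst_succ (words : List String) {k : Nat} (hk : k < words.length) :
    Lst words (k + 1) = (Lst words k).set k (replF (words.getD k "")) := by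
  have hk' : k ≤ words.length := Nat.le_of_lt hk
  have hgetD : words.getD k "" = words[k] := by
    simp [List.getD, List.getElem?_eq_getElem hk]
  have h1 : (Lst words k).set k (replF (words.getD k "")) =
      (words.take k).map replF ++ (replF words[k] :: words.drop (k + 1)) := by
    unfold Lst
    rw [List.drop_eq_getElem_cons hk, List.set_append,
      if_neg (by rw [length_map_take words hk']; omega),
      length_map_take words hk', Nat.sub_self, List.set_cons_zero, hgetD]
  rw [h1]
  unfold Lst
  simp only [List.map_take]
  rw [List.take_add_one]
  have hk2 : k < (List.map replF words).length := by simpa using hk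
  rw [List.getElem?_eq_getElem hk2]
  simp

theorem fold_fst (i : Nat) (word : String) :
    ∀ (items : List (String × String)) (st : List String × Option (Nat × Nat)),
      (items.foldl (innerA i word) st).1 = items.foldl (setStep i word) st.1 := by
  intro items
  induction items with
  | nil => intro st; rfl
  | cons p rest ih =>
    intro st
    simp only [List.foldl_cons]
    rw [ih]
    rfl

theorem CbP_set (i : Nat) (word v : String) (nw : List String) :
    CbP i word (nw.set i v) ↔ CbP i word nw := by
  unfold CbP
  rw [List.length_set]
  unfold List.getD
  rw [List.getElem?_set_ne (by omega)]

theorem fold_snd (i : Nat) (word : String) :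
    ∀ (items : List (String × String)) (nw : List String) (sw : Option (Nat × Nat)),
      items ≠ [] →
      (items.foldl (innerA i word) (nw, sw)).2 =
        if CbP i word nw then some (i, i + 1) else sw := by
  intro items
  induction items with
  | nil => intro nw sw h; exact absurd rfl h
  | cons p rest ih =>
    intro nw sw _
    simp only [List.foldl_cons]
    have hstep : innerA i word (nw, sw) p =
        (setStep i word nw p,
         if CbP i word (setStep i word nw p) then some (i, i + 1) else sw) := rfl
    have hC : CbP i word (setStep i word nw p) ↔ CbP i word nw := by
      unfold setStep
      by_cases h : word == p.1
      · rw [if_pos h]; exact CbP_set i word p.2 nw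
      · rw [if_neg h]
    rw [hstep]
    cases rest with
    | nil =>
      simp only [List.foldl_nil]
      rw [if_congr hC rfl rfl]
    | cons q rest' =>
      by_cases h : CbP i word nw
      · have h' := hC.mpr h
        simp only [ih _ _ (by simp), if_pos h, if_pos h']
      · have h' : ¬ CbP i word (setStep i word nw p) := fun hh => h (hC.mp hh)
        simp only [ih _ _ (by simp), if_neg h, if_neg h']

theorem set_getD_self (nw : List String) {i : Nat} (hi : i < nw.length) :
    nw.set i (nw.getD i "") = nw := by
  unfold List.getD
  rw [List.getElem?_eq_getElem hi]
  simp

theorem lemmaDictB_items : lemmaDictB = PySem.Dict.mk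
    [("best", "good"), ("well", "good"), ("support", "supporting"), ("performance", ""),
     ("role", ""), ("language", ""), ("television", "tv")] := by decide

theorem setStep_fold (i : Nat) (word : String) (nw : List String)
    (hw : nw.getD i "" = word) (hi : i < nw.length) :
    lemmaItemsA.foldl (setStep i word) nw = nw.set i (replF word) := by
  by_cases h1 : word = "best"
  · subst h1
    rw [show replF "best" = "good" from by decide]
    simp [lemmaItemsA, setStep]
  by_cases h2 : word = "well"
  · subst h2
    rw [show replF "well" = "good" from by decide]
    simp [lemmaItemsA, setStep]
  by_cases h3 : word = "support"
  · subst h3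
    rw [show replF "support" = "supporting" from by decide]
    simp [lemmaItemsA, setStep]
  by_cases h4 : word = "performance"
  · subst h4
    rw [show replF "performance" = "" from by decide]
    simp [lemmaItemsA, setStep]
  by_cases h5 : word = "role"
  · subst h5
    rw [show replF "role" = "" from by decide]
    simp [lemmaItemsA, setStep]
  by_cases h6 : word = "language"
  · subst h6
    rw [show replF "language" = "" from by decide]
    simp [lemmaItemsA, setStep]
  by_cases h7 : word = "television"
  · subst h7
    rw [show replF "television" = "tv" from by decide]
    simp [lemmaItemsA, setStep]
  · have hrepl : replF word = word := by
      simp [replF, replB, lemmaDictB_items, PySem.Dict.getD, PySem.Dict.get?, beq_iff_eq,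
        Ne.symm h1, Ne.symm h2, Ne.symm h3, Ne.symm h4, Ne.symm h5, Ne.symm h6, Ne.symm h7]
    have hfold : lemmaItemsA.foldl (setStep i word) nw = nw := by
      simp [lemmaItemsA, setStep, beq_iff_eq, h1, h2, h3, h4, h5, h6, h7]
    rw [hfold, hrepl, ← hw, set_getD_self nw hi]

theorem stepA_eq (words : List String) {k : Nat} (hk : k < words.length)
    (sw : Option (Nat × Nat)) :
    stepA (Lst words k, sw) k =
      (Lst words (k + 1), if condA words k = true then some (k, k + 1) else sw) := by
  have hword : (Lst words k).getD k "" = words.getD k "" :=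
    getD_Lst_ge words (Nat.le_of_lt hk) (Nat.le_refl k)
  have hki : k < (Lst words k).length := by rw [length_Lst]; exact hk
  unfold stepA
  refine Prod.ext ?_ ?_
  · show (lemmaItemsA.foldl (innerA k ((Lst words k).getD k "")) (Lst words k, sw)).1 = _
    rw [fold_fst, setStep_fold k _ (Lst words k) rfl hki, hword, ← Lst_succ words hk]
  · show (lemmaItemsA.foldl (innerA k ((Lst words k).getD k "")) (Lst words k, sw)).2 = _
    rw [fold_snd k _ lemmaItemsA (Lst words k) sw (by simp [lemmaItemsA])]
    have hCiff : CbP k ((Lst words k).getD k "") (Lst words k) ↔ condA words k = true := by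
      unfold CbP condA
      rw [length_Lst, hword, getD_Lst_ge words (Nat.le_of_lt hk) (by omega)]
      simp only [Bool.and_eq_true, Bool.or_eq_true, beq_iff_eq, decide_eq_true_eq]
      tauto
    rw [if_congr hCiff rfl rfl]

theorem outer_fold (words : List String) :
    ∀ k, k ≤ words.length →
      (List.range k).foldl stepA (words, none) =
        (Lst words k,
         ((List.range k).reverse.find? (condA words)).map (fun j => (j, j + 1))) := by
  intro k
  induction k with
  | zero => intro _; simp [Lst]
  | succ k ih =>
    intro hk
    rw [List.range_succ, List.foldl_append, ih (by omega)]
    simp only [List.foldl_cons, List.foldl_nil]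
    rw [stepA_eq words (by omega)]
    rw [List.reverse_append, List.reverse_singleton]
    simp only [List.singleton_append, List.find?_cons]
    cases h : condA words k
    · simp
    · simp

-- a reversed find? over range (m+1) skips the head m when the condition fails there
theorem find?_range_succ_reverse (p : Nat → Bool) (m : Nat) (hp : p m = false) :
    (List.range (m + 1)).reverse.find? p = (List.range m).reverse.find? p := by
  rw [List.range_succ, List.reverse_append, List.reverse_singleton]
  simp only [List.singleton_append, List.find?_cons, hp]

-- A's find runs over [n-1, …, 0], but position n-1 can never satisfy the condition
theorem findA_eq (words : List String) :
    (List.range words.length).reverse.find? (condA words) =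
      (List.range (words.length - 1)).reverse.find? (condA words) := by
  cases hn : words.length with
  | zero => rfl
  | succ m =>
    rw [Nat.add_sub_cancel]
    exact find?_range_succ_reverse _ m (by simp [condA, hn])

theorem adjustLemmas_eq_specForm (words : List String) :
    adjustLemmas words = specForm words := by
  have hLn : Lst words words.length = words.map replF := by
    unfold Lst
    rw [List.take_length, List.drop_length, List.append_nil]
  unfold adjustLemmas specForm
  rw [outer_fold words words.length (Nat.le_refl _), hLn, findA_eq]
  cases hfind : (List.range (words.length - 1)).reverse.find? (condA words) with
  | none => simp
  | some j => simp [swapAt]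

-- ===== B-side lemmas =====

theorem map_take_succ (words : List String) {i : Nat} (hi : i < words.length) :
    (words.take (i + 1)).map replF = (words.take i).map replF ++ [replF (words.getD i "")] := by
  have hi2 : i < (List.map replF words).length := by simpa using hi
  have hg : words.getD i "" = words[i] := by
    simp [List.getD, List.getElem?_eq_getElem hi]
  simp only [List.map_take]
  rw [List.take_add_one, List.getElem?_eq_getElem hi2]
  simp [List.getD, List.getElem?_eq_getElem hi]

theorem swapAt_append_left (l t : List String) (j : Nat) (h : j + 1 < l.length) :
    swapAt (l ++ t) j = swapAt l j ++ t := by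
  unfold swapAt List.getD
  rw [List.getElem?_append_left (show j + 1 < l.length by omega),
    List.getElem?_append_left (show j < l.length by omega),
    List.set_append, if_pos (by omega), List.set_append, if_pos (by simp; omega)]

theorem swapAt_append_pair (l : List String) (a b : String) :
    swapAt (l ++ [a, b]) l.length = l ++ [b, a] := by
  unfold swapAt List.getD
  have h1 : (l ++ [a, b])[l.length]? = some a := by
    rw [List.getElem?_append_right (Nat.le_refl _), Nat.sub_self]; rfl
  have h2 : (l ++ [a, b])[l.length + 1]? = some b := by
    rw [List.getElem?_append_right (by omega), Nat.add_sub_cancel_left]; rfl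
  rw [h1, h2]
  simp only [Option.getD_some]
  rw [List.set_append, if_neg (by omega), Nat.sub_self]
  rw [List.set_append, if_neg (by omega), Nat.add_sub_cancel_left]
  simp

theorem goB_true (words : List String) :
    ∀ m, m ≤ words.length → ∀ out,
      goB words m true out = (words.take m).map replF ++ out := by
  intro m
  induction m with
  | zero => intro _ out; simp [goB]
  | succ i ih =>
    intro hm out
    rw [goB]
    simp only [Bool.not_true, Bool.false_and, Bool.false_eq_true, if_false]
    rw [ih (by omega), map_take_succ words (by omega)]
    simp [replF]

theorem replF_supporting : replF "supporting" = "supporting" := by decide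
theorem replF_actor : replF "actor" = "actor" := by decide
theorem replF_actress : replF "actress" = "actress" := by decide

theorem goB_false (words : List String) :
    ∀ m, m ≤ words.length → ∀ out,
      goB words m false out =
        (((List.range (m - 1)).reverse.find? (condA words)).elim
            ((words.take m).map replF)
            (fun j => swapAt ((words.take m).map replF) j)) ++ out := by
  intro m
  induction m with
  | zero => intro _ out; simp [goB]
  | succ i ih =>
    intro hm out
    have hi : i < words.length := by omega
    rw [goB]
    simp only [Bool.not_false, Bool.true_and, Nat.add_sub_cancel]
    by_cases hC : (decide (0 < i) && (words.getD i "" == "supporting") &&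
        (words.getD (i - 1) "" == "actor" || words.getD (i - 1) "" == "actress")) = true
    · -- pair found: B consumes it and finishes with the plain replacement pass
      rw [if_pos hC]
      obtain ⟨⟨h0, hsup⟩, hact⟩ := by
        simpa only [Bool.and_eq_true, Bool.or_eq_true, decide_eq_true_eq, beq_iff_eq] using hC
      have hcond : condA words (i - 1) = true := by
        unfold condA
        have hidx : i - 1 + 1 = i := by omega
        rw [hidx]
        simp only [Bool.and_eq_true, Bool.or_eq_true, beq_iff_eq, decide_eq_true_eq]
        exact ⟨⟨by omega, hact⟩, hsup⟩
      have hrange : (List.range i).reverse.find? (condA words) = some (i - 1) := by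
        rw [show i = (i - 1) + 1 by omega, List.range_succ, List.reverse_append,
          List.reverse_singleton]
        simp [hcond]
      rw [hrange, Option.elim_some]
      rw [goB_true words (i - 1) (by omega)]
      have htake : (words.take (i + 1)).map replF =
          (words.take (i - 1)).map replF ++ [words.getD (i - 1) "", "supporting"] := by
        rw [map_take_succ words hi, show i = (i - 1) + 1 by omega,
          map_take_succ words (show i - 1 < words.length by omega)]
        have h1 : replF (words.getD (i - 1) "") = words.getD (i - 1) "" := by
          rcases hact with h | h <;> rw [h]
          · exact replF_actor
          · exact replF_actress
        have h2 : replF (words.getD (i - 1 + 1) "") = "supporting" := by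
          rw [show i - 1 + 1 = i by omega, hsup]; exact replF_supporting
        rw [h1, h2]
        simp
      have hlen : ((words.take (i - 1)).map replF).length = i - 1 :=
        length_map_take words (by omega)
      have hswap := swapAt_append_pair ((words.take (i - 1)).map replF)
        (words.getD (i - 1) "") "supporting"
      rw [hlen] at hswap
      rw [htake, hswap]
      simp
    · rw [if_neg hC]
      rw [show replB (words.getD i "") = replF (words.getD i "") from rfl]
      rw [ih (by omega)]
      rcases Nat.eq_zero_or_pos i with h0 | h0
      · subst h0
        simp only [List.range_zero, List.reverse_nil, List.find?_nil, Nat.zero_sub,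
          Option.elim_none]
        rw [map_take_succ words hi]
        simp
      · have hcond : condA words (i - 1) = false := by
          unfold condA
          have hidx : i - 1 + 1 = i := by omega
          rw [hidx]
          rcases Bool.eq_false_or_eq_true (words.getD i "" == "supporting") with hs | hs
          · rcases Bool.eq_false_or_eq_true
                (words.getD (i - 1) "" == "actor" || words.getD (i - 1) "" == "actress") with ha | ha
            · exact absurd (by rw [decide_eq_true h0, hs, ha]; rfl) hC
            · rw [ha]; simp
          · rw [hs]; simp
        have hfind : (List.range i).reverse.find? (condA words) =
            (List.range (i - 1)).reverse.find? (condA words) := by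
          rw [show i = (i - 1) + 1 by omega]
          exact find?_range_succ_reverse _ (i - 1) hcond
        rw [hfind]
        cases hf : (List.range (i - 1)).reverse.find? (condA words) with
        | none =>
          simp only [Option.elim_none]
          rw [map_take_succ words hi]
          simp
        | some j =>
          simp only [Option.elim_some]
          have hj : j < i - 1 := by
            have := List.mem_of_find?_eq_some hf
            rw [List.mem_reverse, List.mem_range] at this
            exact this
          have hjl : j + 1 < ((words.take i).map replF).length := by
            rw [length_map_take words (Nat.le_of_lt hi)]; omega
          rw [map_take_succ words hi, swapAt_append_left _ _ _ hjl]
          simp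

theorem adjustLemmas_alt_eq_specForm (words : List String) :
    adjustLemmas_alt words = specForm words := by
  unfold adjustLemmas_alt specForm
  rw [goB_false words words.length (Nat.le_refl _) []]
  rw [List.take_length]
  cases (List.range (words.length - 1)).reverse.find? (condA words) <;> simp

-- ===== VERDICT (by name: the statement is the Claim_ definition above) =====
theorem adjustLemmas_spec : Claim_equal_adjustLemmas := by
  intro words _
  unfold Spec_adjustLemmas
  rw [adjustLemmas_eq_specForm, adjustLemmas_alt_eq_specForm]
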